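-- pv_equiv track=rewrite | github.com/reborndigitals/SHASHA-DRUGZ | SHASHA_DRUGZ/plugins/PREMIUM/wordseek.py | build_alphabet_tracker
-- ===== SOURCE A (Python) =====
-- _SQ_GREEN  = "🟩"
--
-- _SQ_YELLOW = "🟨"
--
-- _SQ_RED    = "🟥"
--
-- def build_alphabet_tracker(word: str, guesses: list) -> str:
--     """Live per-letter 🟩🟨🟥 grid, rendered in rows of 9."""
--     correct = set()
--     present = set()
--     absent  = set()
--     for g in guesses:
--         for i, ch in enumerate(g):
--             if i < len(word) and ch == word[i]:
--                 correct.add(ch)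
--             elif ch in word:
--                 present.add(ch)
--             else:
--                 absent.add(ch)
--     present -= correct
--     absent  -= correct | present
--     parts = []
--     for ch in "abcdefghijklmnopqrstuvwxyz":
--         if   ch in correct: parts.append(f"{_SQ_GREEN}`{ch}`")
--         elif ch in present: parts.append(f"{_SQ_YELLOW}`{ch}`")
--         elif ch in absent:  parts.append(f"{_SQ_RED}`{ch}`")
--     if not parts:
--         return "_No letters guessed yet._"
--     rows, row = [], []
--     for p in parts:
--         row.append(p)
--         if len(row) == 9:
--             rows.append(" ".join(row))
--             row = []
--     if row:
--         rows.append(" ".join(row))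
--     return "\n".join(rows)
-- ===== SOURCE B (Python) =====
-- _SQ_GREEN  = "🟩"
-- _SQ_YELLOW = "🟨"
-- _SQ_RED    = "🟥"
--
-- def _square(r):
--     return _SQ_GREEN if r == 3 else (_SQ_YELLOW if r == 2 else _SQ_RED)
--
-- def _chunk9(xs):
--     if not xs:
--         return []
--     return [xs[:9]] + _chunk9(xs[9:])
--
-- def build_alphabet_tracker(word: str, guesses: list) -> str:
--     """Live per-letter tracker: one dict of best rank per letter (green=3, yellow=2, red=1)."""
--     rank = {}
--     for g in guesses:
--         for i, ch in enumerate(g):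
--             if i < len(word) and ch == word[i]:
--                 r = 3
--             elif ch in word:
--                 r = 2
--             else:
--                 r = 1
--             if r > rank.get(ch, 0):
--                 rank[ch] = r
--     parts = [f"{_square(rank[ch])}`{ch}`" for ch in "abcdefghijklmnopqrstuvwxyz" if ch in rank]
--     if not parts:
--         return "_No letters guessed yet._"
--     return "\n".join(" ".join(row) for row in _chunk9(parts))
-- ===== Notes on version B (the rewrite author's own statement) =====
-- stated objective: idiomatic
-- what changed: Replaces the three sets plus two set-subtraction reconciliation steps with a single dict tracking each letter's best rank (green=3, yellow=2, red=1) updated by max in one pass, and replaces the stateful row-of-9 accumulator with slice-based chunking.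
import Mathlib
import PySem

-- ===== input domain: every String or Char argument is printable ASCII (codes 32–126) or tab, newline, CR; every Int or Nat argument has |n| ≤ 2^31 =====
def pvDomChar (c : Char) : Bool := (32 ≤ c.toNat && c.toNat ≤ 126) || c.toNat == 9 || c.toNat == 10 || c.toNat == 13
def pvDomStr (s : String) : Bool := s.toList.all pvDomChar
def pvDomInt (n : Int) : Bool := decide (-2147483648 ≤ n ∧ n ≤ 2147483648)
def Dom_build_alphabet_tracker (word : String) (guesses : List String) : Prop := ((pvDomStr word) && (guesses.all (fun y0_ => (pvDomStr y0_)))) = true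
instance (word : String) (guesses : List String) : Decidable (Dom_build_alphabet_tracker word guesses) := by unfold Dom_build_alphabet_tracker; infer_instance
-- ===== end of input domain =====

-- B replaces A's three sets + two set subtractions by one dict of best ranks and the
-- row accumulator by slice-based chunking (objective: more idiomatic; same cost).

-- ===== PORT A =====
def pvSqGreen : String := "🟩"
def pvSqYellow : String := "🟨"
def pvSqRed : String := "🟥"
def pvAlphabet : List Char := "abcdefghijklmnopqrstuvwxyz".toList

-- one body of A's inner loop: classify occurrence (i, ch) into the three sets
def pvStepA (wl : List Char) (st : PySem.Set Char × PySem.Set Char × PySem.Set Char)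
    (p : Int × Char) : PySem.Set Char × PySem.Set Char × PySem.Set Char :=
  if p.1 < (wl.length : Int) ∧ PySem.List.pyGetD wl p.1 p.2 = p.2 then
    (st.1.add p.2, st.2.1, st.2.2)
  else if p.2 ∈ wl then (st.1, st.2.1.add p.2, st.2.2)
  else (st.1, st.2.1, st.2.2.add p.2)

-- one body of A's row loop: append p, flush the row at length 9
def pvStepRow (st : List String × List String) (p : String) : List String × List String :=
  let row := st.2 ++ [p]
  if row.length = 9 then (st.1 ++ [PySem.Str.join " " row], []) else (st.1, row)

def build_alphabet_tracker (word : String) (guesses : List String) : String :=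
  let wl := word.toList
  let st := guesses.foldl
    (fun st g => (PySem.List.enumerate g.toList 0).foldl (pvStepA wl) st)
    (PySem.Set.empty, PySem.Set.empty, PySem.Set.empty)
  let correct : PySem.Set Char := st.1
  let present : PySem.Set Char := PySem.Set.diff st.2.1 correct
  let absent : PySem.Set Char := PySem.Set.diff st.2.2 (PySem.Set.union correct present)
  let parts := pvAlphabet.foldl
    (fun parts ch =>
      if ch ∈ correct then parts ++ [pvSqGreen ++ "`" ++ String.ofList [ch] ++ "`"]
      else if ch ∈ present then parts ++ [pvSqYellow ++ "`" ++ String.ofList [ch] ++ "`"]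
      else if ch ∈ absent then parts ++ [pvSqRed ++ "`" ++ String.ofList [ch] ++ "`"]
      else parts) []
  if parts = [] then "_No letters guessed yet._"
  else
    let st := parts.foldl pvStepRow ([], [])
    let rows := if st.2 ≠ [] then st.1 ++ [PySem.Str.join " " st.2] else st.1
    PySem.Str.join "\n" rows

-- ===== PORT B =====
def pvSquare (r : Int) : String := if r = 3 then pvSqGreen else if r = 2 then pvSqYellow else pvSqRed

-- one body of B's loop: rank the occurrence, keep the max rank per letter
def pvStepB (wl : List Char) (d : PySem.Dict Char Int) (p : Int × Char) : PySem.Dict Char Int :=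
  let r : Int :=
    if p.1 < (wl.length : Int) ∧ PySem.List.pyGetD wl p.1 p.2 = p.2 then 3
    else if p.2 ∈ wl then 2 else 1
  if d.getD p.2 0 < r then d.insert p.2 r else d

def pvChunk9 : List String → List (List String)
  | [] => []
  | x :: xs => ((x :: xs).take 9) :: pvChunk9 ((x :: xs).drop 9)
termination_by xs => xs.length
decreasing_by simp [List.length_drop]

def build_alphabet_tracker_alt (word : String) (guesses : List String) : String :=
  let wl := word.toList
  let rank := guesses.foldl
    (fun d g => (PySem.List.enumerate g.toList 0).foldl (pvStepB wl) d) PySem.Dict.empty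
  let parts := (pvAlphabet.filter (fun ch => rank.contains ch)).map
    (fun ch => pvSquare (rank.getD ch 0) ++ "`" ++ String.ofList [ch] ++ "`")
  if parts = [] then "_No letters guessed yet._"
  else PySem.Str.join "\n" ((pvChunk9 parts).map (fun row => PySem.Str.join " " row))

-- ===== PRECONDITION & SPEC =====
def Spec_build_alphabet_tracker (word : String) (guesses : List String) (out : String) : Prop := out = build_alphabet_tracker_alt word guesses
instance (word : String) (guesses : List String) (out : String) : Decidable (Spec_build_alphabet_tracker word guesses out) := by unfold Spec_build_alphabet_tracker; infer_instance

-- ===== CLAIM (what is proved, stated in full; the proofs are below) =====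
def Claim_equal_build_alphabet_tracker : Prop := ∀ (word : String) (guesses : List String), Dom_build_alphabet_tracker word guesses → Spec_build_alphabet_tracker word guesses (build_alphabet_tracker word guesses)

-- ===== LEMMAS AND PROOFS =====

-- the best rank a letter has according to A's three sets
def pvRk (st : PySem.Set Char × PySem.Set Char × PySem.Set Char) (x : Char) : Int :=
  if x ∈ st.1 then 3 else if x ∈ st.2.1 then 2 else if x ∈ st.2.2 then 1 else 0

-- invariant: B's dict stores exactly the best rank of each guessed letter
def pvInv (st : PySem.Set Char × PySem.Set Char × PySem.Set Char) (d : PySem.Dict Char Int) : Prop :=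
  ∀ x, d.get? x = if pvRk st x = 0 then none else some (pvRk st x)

set_option maxHeartbeats 1000000 in
lemma pvInv_step (wl : List Char) (st : PySem.Set Char × PySem.Set Char × PySem.Set Char)
    (d : PySem.Dict Char Int) (h : pvInv st d) (p : Int × Char) :
    pvInv (pvStepA wl st p) (pvStepB wl d p) := by
  intro x
  have hpx := h p.2
  have hxx := h x
  have hgetD : d.getD p.2 0 = if pvRk st p.2 = 0 then 0 else pvRk st p.2 := by
    rw [PySem.Dict.getD_eq_get?_getD, hpx]; split <;> rfl
  unfold pvStepA pvStepB
  simp only [pvRk] at hpx hxx hgetD ⊢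
  by_cases hx : x = p.2
  · subst hx
    by_cases h1 : p.2 ∈ st.1 <;> by_cases h2 : p.2 ∈ st.2.1 <;> by_cases h3 : p.2 ∈ st.2.2 <;>
      split_ifs <;>
      simp_all [PySem.Set.mem_add, PySem.Dict.get?_insert, hgetD]
  · have hL : ∀ (r : Int), (if d.getD p.2 0 < r then d.insert p.2 r else d).get? x = d.get? x := by
      intro r; split
      · simp [PySem.Dict.get?_insert, hx]
      · rfl
    rw [hL, hxx]
    split_ifs <;> simp_all [PySem.Set.mem_add]

lemma pvInv_foldl (wl : List Char) (l : List (Int × Char))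
    (st : PySem.Set Char × PySem.Set Char × PySem.Set Char) (d : PySem.Dict Char Int)
    (h : pvInv st d) :
    pvInv (l.foldl (pvStepA wl) st) (l.foldl (pvStepB wl) d) := by
  induction l generalizing st d with
  | nil => exact h
  | cons p l ih => exact ih _ _ (pvInv_step wl st d h p)

lemma pvInv_guesses (wl : List Char) (gs : List String)
    (st : PySem.Set Char × PySem.Set Char × PySem.Set Char) (d : PySem.Dict Char Int)
    (h : pvInv st d) :
    pvInv (gs.foldl (fun st g => (PySem.List.enumerate g.toList 0).foldl (pvStepA wl) st) st)
      (gs.foldl (fun d g => (PySem.List.enumerate g.toList 0).foldl (pvStepB wl) d) d) := by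
  induction gs generalizing st d with
  | nil => exact h
  | cons g gs ih => exact ih _ _ (pvInv_foldl wl _ st d h)

lemma pvInv_empty : pvInv (PySem.Set.empty, PySem.Set.empty, PySem.Set.empty) PySem.Dict.empty := by
  intro x; simp [pvRk, PySem.Set.empty, PySem.Dict.get?_empty]

-- the per-letter emitted cell, seen from A's sets and from B's dict, agree
lemma pvEmit_eq (st : PySem.Set Char × PySem.Set Char × PySem.Set Char)
    (d : PySem.Dict Char Int) (h : pvInv st d) (ch : Char) :
    (if ch ∈ st.1 then [pvSqGreen ++ "`" ++ String.ofList [ch] ++ "`"]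
     else if ch ∈ PySem.Set.diff st.2.1 st.1 then [pvSqYellow ++ "`" ++ String.ofList [ch] ++ "`"]
     else if ch ∈ PySem.Set.diff st.2.2 (PySem.Set.union st.1 (PySem.Set.diff st.2.1 st.1)) then
       [pvSqRed ++ "`" ++ String.ofList [ch] ++ "`"]
     else [])
    = (if d.contains ch then [pvSquare (d.getD ch 0) ++ "`" ++ String.ofList [ch] ++ "`"] else []) := by
  have hc : d.contains ch = (d.get? ch).isSome := PySem.Dict.contains_eq_isSome_get? d ch
  have hg : d.getD ch 0 = (d.get? ch).getD 0 := PySem.Dict.getD_eq_get?_getD d ch 0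
  rw [hc, hg, h ch]
  unfold pvRk pvSquare
  simp only [PySem.Set.mem_diff, PySem.Set.mem_union]
  split_ifs <;> simp_all

-- the filter/map comprehension as a flatMap (glue for B's parts list)
lemma pvFilterMap_flatMap (l : List Char) (p : Char → Bool) (f : Char → String) :
    (l.filter p).map f = l.flatMap (fun x => if p x then [f x] else []) := by
  induction l with
  | nil => rfl
  | cons x l ih => by_cases hx : p x <;> simp [hx, ih]

-- A's parts loop produces exactly B's comprehension once the invariant holds
lemma pvParts_eq (st : PySem.Set Char × PySem.Set Char × PySem.Set Char)
    (d : PySem.Dict Char Int) (h : pvInv st d) :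
    pvAlphabet.foldl
      (fun parts ch =>
        if ch ∈ st.1 then parts ++ [pvSqGreen ++ "`" ++ String.ofList [ch] ++ "`"]
        else if ch ∈ PySem.Set.diff st.2.1 st.1 then parts ++ [pvSqYellow ++ "`" ++ String.ofList [ch] ++ "`"]
        else if ch ∈ PySem.Set.diff st.2.2 (PySem.Set.union st.1 (PySem.Set.diff st.2.1 st.1)) then
          parts ++ [pvSqRed ++ "`" ++ String.ofList [ch] ++ "`"]
        else parts) []
    = (pvAlphabet.filter (fun ch => d.contains ch)).map
        (fun ch => pvSquare (d.getD ch 0) ++ "`" ++ String.ofList [ch] ++ "`") := by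
  have hbody :
      (fun (parts : List String) ch =>
        if ch ∈ st.1 then parts ++ [pvSqGreen ++ "`" ++ String.ofList [ch] ++ "`"]
        else if ch ∈ PySem.Set.diff st.2.1 st.1 then parts ++ [pvSqYellow ++ "`" ++ String.ofList [ch] ++ "`"]
        else if ch ∈ PySem.Set.diff st.2.2 (PySem.Set.union st.1 (PySem.Set.diff st.2.1 st.1)) then
          parts ++ [pvSqRed ++ "`" ++ String.ofList [ch] ++ "`"]
        else parts)
      = (fun parts ch => parts ++
          (if ch ∈ st.1 then [pvSqGreen ++ "`" ++ String.ofList [ch] ++ "`"]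
           else if ch ∈ PySem.Set.diff st.2.1 st.1 then [pvSqYellow ++ "`" ++ String.ofList [ch] ++ "`"]
           else if ch ∈ PySem.Set.diff st.2.2 (PySem.Set.union st.1 (PySem.Set.diff st.2.1 st.1)) then
             [pvSqRed ++ "`" ++ String.ofList [ch] ++ "`"]
           else [])) := by
    funext parts ch; split_ifs <;> simp
  rw [hbody, PySem.List.foldl_append_eq_flatMap, pvFilterMap_flatMap]
  have hfun : (fun ch =>
      if ch ∈ st.1 then [pvSqGreen ++ "`" ++ String.ofList [ch] ++ "`"]
      else if ch ∈ PySem.Set.diff st.2.1 st.1 then [pvSqYellow ++ "`" ++ String.ofList [ch] ++ "`"]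
      else if ch ∈ PySem.Set.diff st.2.2 (PySem.Set.union st.1 (PySem.Set.diff st.2.1 st.1)) then
        [pvSqRed ++ "`" ++ String.ofList [ch] ++ "`"]
      else [])
      = (fun ch => if d.contains ch then [pvSquare (d.getD ch 0) ++ "`" ++ String.ofList [ch] ++ "`"] else []) :=
    funext (pvEmit_eq st d h)
  rw [hfun]; rfl

-- A's accumulator chunking equals B's slice chunking
lemma pvChunk9_cons (xs : List String) (h : xs ≠ []) :
    pvChunk9 xs = xs.take 9 :: pvChunk9 (xs.drop 9) := by
  cases xs with
  | nil => exact absurd rfl h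
  | cons x t => simp [pvChunk9]

lemma pvRow_chunk (xs : List String) (rows row : List String) (h : row.length < 9) :
    (if (xs.foldl pvStepRow (rows, row)).2 ≠ [] then
       (xs.foldl pvStepRow (rows, row)).1 ++ [PySem.Str.join " " (xs.foldl pvStepRow (rows, row)).2]
     else (xs.foldl pvStepRow (rows, row)).1)
    = rows ++ (pvChunk9 (row ++ xs)).map (fun r => PySem.Str.join " " r) := by
  induction xs generalizing rows row with
  | nil =>
    simp only [List.foldl_nil, List.append_nil]
    by_cases hr : row = []
    · subst hr; simp [pvChunk9]
    · have hd : row.drop 9 = [] := List.eq_nil_of_length_eq_zero (by simp; omega)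
      rw [pvChunk9_cons _ hr, hd, List.take_of_length_le (by omega : row.length ≤ 9)]
      simp [hr, pvChunk9]
  | cons x xs ih =>
    simp only [List.foldl_cons]
    by_cases h9 : (row ++ [x]).length = 9
    · have hstep : pvStepRow (rows, row) x
          = (rows ++ [PySem.Str.join " " (row ++ [x])], []) := by
        unfold pvStepRow; simp only [h9, if_pos]
      rw [hstep, ih _ _ (by simp)]
      have hne : row ++ x :: xs ≠ [] := by simp
      have hrw : row ++ x :: xs = (row ++ [x]) ++ xs := by simp
      have ht : ((row ++ [x]) ++ xs).take 9 = row ++ [x] := List.take_left' h9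
      have hdp : ((row ++ [x]) ++ xs).drop 9 = xs := List.drop_left' h9
      rw [pvChunk9_cons _ hne, hrw, ht, hdp]
      simp
    · have hstep : pvStepRow (rows, row) x = (rows, row ++ [x]) := by
        unfold pvStepRow; simp only [h9, if_neg, not_false_iff]
      have hlen : (row ++ [x]).length < 9 := by simp at h9 ⊢; omega
      rw [hstep, ih _ _ hlen]
      simp

-- ===== VERDICT (by name: the statement is the Claim_ definition above) =====
theorem build_alphabet_tracker_spec : Claim_equal_build_alphabet_tracker := by
  intro word guesses _
  unfold Spec_build_alphabet_tracker build_alphabet_tracker build_alphabet_tracker_alt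
  simp only []
  rw [pvParts_eq _ _ (pvInv_guesses word.toList guesses _ _ pvInv_empty)]
  by_cases hp : (pvAlphabet.filter (fun ch =>
      PySem.Dict.contains (guesses.foldl (fun d g =>
        (PySem.List.enumerate g.toList 0).foldl (pvStepB word.toList) d) PySem.Dict.empty) ch)).map
      (fun ch => pvSquare (PySem.Dict.getD (guesses.foldl (fun d g =>
        (PySem.List.enumerate g.toList 0).foldl (pvStepB word.toList) d) PySem.Dict.empty) ch 0)
        ++ "`" ++ String.ofList [ch] ++ "`") = []
  · simp [hp]
  · simp only [hp, if_neg, not_false_iff]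
    rw [show ∀ xs : List String,
        (if (xs.foldl pvStepRow ([], [])).2 ≠ [] then
          (xs.foldl pvStepRow ([], [])).1 ++ [PySem.Str.join " " (xs.foldl pvStepRow ([], [])).2]
        else (xs.foldl pvStepRow ([], [])).1)
        = (pvChunk9 xs).map (fun r => PySem.Str.join " " r) from
      fun xs => by simpa using pvRow_chunk xs [] [] (by simp)]
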